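-- pv_equiv track=rewrite | github.com/Daikeri/Summer-Practice | SummerPractice/data_analysis/extract_values.py | separate_matrices
-- ===== SOURCE A (Python) =====
-- def get_column(container, index):
--     acc = []
--     for row in container:
--         acc.append(row[index])
--     return acc
--
-- def separate_matrices(combined_matrix, latency_list):
--     scalar_matrix = {'latency': latency_list}
--     categorical_matrix = {'latency': latency_list}
--
--     for val in range(len(combined_matrix[0])):
--         future_dict = get_column(combined_matrix, val)
--         if combined_matrix[1][val].isdigit():
--             scalar_matrix[future_dict[0]] = future_dict[1:]
--         else:
--             categorical_matrix[future_dict[0]] = future_dict[1:]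
--     return scalar_matrix, categorical_matrix
-- ===== SOURCE B (Python) =====
-- def separate_matrices(combined_matrix, latency_list):
--     scalar_matrix = {'latency': latency_list}
--     categorical_matrix = {'latency': latency_list}
--     headers = combined_matrix[0]
--     # pass 1: one empty accumulator list per column, placed into the right dict
--     targets = []
--     for i, h in enumerate(headers):
--         col = []
--         if combined_matrix[1][i].isdigit():
--             scalar_matrix[h] = col
--         else:
--             categorical_matrix[h] = col
--         targets.append(col)
--     # pass 2: distribute each data row across the column accumulators
--     for row in combined_matrix[1:]:
--         for i in range(len(headers)):
--             targets[i].append(row[i])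
--     return scalar_matrix, categorical_matrix
-- ===== Notes on version B (the rewrite author's own statement) =====
-- stated objective: alternative
-- what changed: B replaces A's column-major loop (which re-scans every row once per column via get_column) with a row-major decomposition: one pass over the header/classifier sets up per-column accumulator lists inside the right dict, then one pass over the data rows distributes row[i] into accumulator i.
import Mathlib
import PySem

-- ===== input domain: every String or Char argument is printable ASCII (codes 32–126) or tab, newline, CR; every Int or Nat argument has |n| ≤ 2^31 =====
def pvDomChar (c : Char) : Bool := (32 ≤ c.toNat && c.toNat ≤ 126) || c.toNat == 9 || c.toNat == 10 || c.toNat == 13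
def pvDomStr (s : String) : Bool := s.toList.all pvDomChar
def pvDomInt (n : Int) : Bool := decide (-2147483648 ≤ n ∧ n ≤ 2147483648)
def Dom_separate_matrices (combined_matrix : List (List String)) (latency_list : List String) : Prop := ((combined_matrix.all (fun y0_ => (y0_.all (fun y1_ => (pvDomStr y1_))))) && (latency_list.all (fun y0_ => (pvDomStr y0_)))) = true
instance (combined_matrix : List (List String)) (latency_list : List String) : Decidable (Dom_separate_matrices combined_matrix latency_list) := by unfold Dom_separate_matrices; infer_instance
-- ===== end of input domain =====

-- B replaces A's column-major loop (get_column re-scans all rows once per column) by a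
-- row-major distribution: one pass sets up per-column accumulators and their destination
-- dicts, one pass over the data rows appends row[i] to accumulator i — alternative
-- decomposition, same return value on every input A accepts.

-- ===== PORT A =====
def get_column (container : List (List String)) (index : Int) : List String :=
  container.foldl (fun acc row => acc ++ [PySem.List.pyGetD row index ""]) []

def separate_matrices (combined_matrix : List (List String)) (latency_list : List String) : (List (String × List String)) × (List (String × List String)) :=
  let res : PySem.Dict String (List String) × PySem.Dict String (List String) := (PySem.List.pyRange 0 (PySem.List.len (PySem.List.pyGetD combined_matrix 0 [])) 1).foldl
    (fun (p : PySem.Dict String (List String) × PySem.Dict String (List String)) val =>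
      if PySem.Str.strIsdigit (PySem.List.pyGetD (PySem.List.pyGetD combined_matrix 1 []) val "") then
        (p.1.insert (PySem.List.pyGetD (get_column combined_matrix val) 0 "") (PySem.List.slice (get_column combined_matrix val) (some 1) none), p.2)
      else
        (p.1, p.2.insert (PySem.List.pyGetD (get_column combined_matrix val) 0 "") (PySem.List.slice (get_column combined_matrix val) (some 1) none)))
    (PySem.Dict.empty.insert "latency" latency_list, PySem.Dict.empty.insert "latency" latency_list)
  (res.1.items, res.2.items)

-- ===== PORT B =====
-- Source B's mutable per-column list references are modeled functionally: `cols` is the state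
-- of the `targets` accumulators after pass 2 (the fold over combined_matrix[1:] appends
-- row[i] to accumulator i), and the pass-1 insertions store those final contents.
def separate_matrices_alt (combined_matrix : List (List String)) (latency_list : List String) : (List (String × List String)) × (List (String × List String)) :=
  let headers := PySem.List.pyGetD combined_matrix 0 []
  let n := headers.length
  -- pass 2: distribute each data row across the n column accumulators (targets[i].append(row[i]))
  let cols := (PySem.List.slice combined_matrix (some 1) none).foldl
      (fun (acc : List (List String)) row =>
        (List.range n).map (fun i => acc.getD i [] ++ [PySem.List.pyGetD row (i : Int) ""]))
      ((List.range n).map (fun _ => ([] : List String)))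
  -- pass 1: put each column's accumulator into the dict chosen by its classifier entry
  let res : PySem.Dict String (List String) × PySem.Dict String (List String) := (List.range n).foldl
      (fun (p : PySem.Dict String (List String) × PySem.Dict String (List String)) (i : Nat) =>
        if PySem.Str.strIsdigit (PySem.List.pyGetD (PySem.List.pyGetD combined_matrix 1 []) (i : Int) "") then
          (p.1.insert (headers.getD i "") (cols.getD i []), p.2)
        else
          (p.1, p.2.insert (headers.getD i "") (cols.getD i [])))
      (PySem.Dict.empty.insert "latency" latency_list, PySem.Dict.empty.insert "latency" latency_list)
  (res.1.items, res.2.items)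

-- ===== PRECONDITION & SPEC =====
-- Pre_ excludes exactly the inputs where Python A raises IndexError: an empty matrix
-- (combined_matrix[0]), a row shorter than the header row (row[index] in get_column), and a
-- single-row matrix with nonempty headers (combined_matrix[1]).
def Pre_separate_matrices (combined_matrix : List (List String)) (latency_list : List String) : Prop :=
  combined_matrix ≠ [] ∧
  (∀ row ∈ combined_matrix, (combined_matrix.headD []).length ≤ row.length) ∧
  ((combined_matrix.headD []) ≠ [] → 2 ≤ combined_matrix.length)
instance (combined_matrix : List (List String)) (latency_list : List String) : Decidable (Pre_separate_matrices combined_matrix latency_list) := by unfold Pre_separate_matrices; infer_instance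

def pvWitness_separate_matrices : List (List String) × List String :=
  ([["h", "c"], ["1", "x"], ["2", "y"]], ["5"])

def Spec_separate_matrices (combined_matrix : List (List String)) (latency_list : List String) (out : (List (String × List String)) × (List (String × List String))) : Prop := out = separate_matrices_alt combined_matrix latency_list
instance (combined_matrix : List (List String)) (latency_list : List String) (out : (List (String × List String)) × (List (String × List String))) : Decidable (Spec_separate_matrices combined_matrix latency_list out) := by unfold Spec_separate_matrices; infer_instance

-- ===== CLAIM (what is proved, stated in full; the proofs are below) =====
def Claim_equal_separate_matrices : Prop := ∀ (combined_matrix : List (List String)) (latency_list : List String), Dom_separate_matrices combined_matrix latency_list → Pre_separate_matrices combined_matrix latency_list → Spec_separate_matrices combined_matrix latency_list (separate_matrices combined_matrix latency_list)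

-- ===== LEMMAS AND PROOFS =====

-- A's get_column is the list of entries at `index` down the rows (with pyGetD's default).
theorem get_column_eq_map (cm : List (List String)) (i : Nat) :
    get_column cm (i : Int) = cm.map (fun r => r.getD i "") := by
  unfold get_column
  rw [PySem.List.foldl_append_singleton_eq_map]
  simp [PySem.List.pyGetD_natCast]

-- Pass 2 of B: folding the rows into the accumulators yields, at each index i < n,
-- exactly the column i of the processed rows.
theorem cols_foldl_spec (n : Nat) (rows : List (List String)) :
    ∀ (g : Nat → List String),
    rows.foldl
      (fun (acc : List (List String)) row =>
        (List.range n).map (fun i => acc.getD i [] ++ [PySem.List.pyGetD row (i : Int) ""]))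
      ((List.range n).map g)
    = (List.range n).map (fun i => g i ++ rows.map (fun r => r.getD i "")) := by
  induction rows with
  | nil => intro g; simp
  | cons r rs ih =>
    intro g
    rw [List.foldl_cons]
    have hstep :
        (List.range n).map (fun i => ((List.range n).map g).getD i [] ++ [PySem.List.pyGetD r (i : Int) ""])
        = (List.range n).map (fun i => g i ++ [r.getD i ""]) := by
      apply List.map_congr_left
      intro i hi
      rw [PySem.List.getD_map_range g n i [] (List.mem_range.mp hi)]
      simp [PySem.List.pyGetD_natCast]
    rw [hstep, ih]
    apply List.map_congr_left
    intro i _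
    simp

-- ===== VERDICT (by name: the statement is the Claim_ definition above) =====
theorem separate_matrices_spec : Claim_equal_separate_matrices := by
  intro cm lat _hdom hpre
  obtain ⟨hne, _hall, _hlen⟩ := hpre
  unfold Spec_separate_matrices separate_matrices separate_matrices_alt
  obtain ⟨r0, rs, rfl⟩ : ∃ r0 rs, cm = r0 :: rs := by
    cases cm with
    | nil => exact absurd rfl hne
    | cons a as => exact ⟨a, as, rfl⟩
  simp only [PySem.List.pyGetD_zero_cons, PySem.List.slice_from_one, List.tail_cons]
  set n := r0.length with hn
  have hcols := cols_foldl_spec n rs (fun _ => ([] : List String))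
  rw [hcols]
  have hrange : PySem.List.pyRange 0 (PySem.List.len r0) 1
      = List.map (fun k : Nat => (k : Int)) (List.range n) := by
    rw [show PySem.List.len r0 = (n : Int) from by simp [PySem.List.len_eq, hn]]
    exact PySem.List.pyRange_zero_natCast n
  rw [hrange, List.foldl_map]
  refine congrArg
    (fun z : PySem.Dict String (List String) × PySem.Dict String (List String) => (z.1.items, z.2.items))
    (PySem.List.foldl_congr_mem (List.range n) _ _ _ ?_)
  intro p i hi
  have hi' := List.mem_range.mp hi
  have hcol : get_column (r0 :: rs) ((i : Nat) : Int)
      = r0.getD i "" :: rs.map (fun r => r.getD i "") := by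
    rw [get_column_eq_map]; simp
  simp only [hcol, PySem.List.pyGetD_zero_cons, List.tail_cons]
  rw [PySem.List.getD_map_range _ n i [] hi']
  simp
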